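-- pv_equiv track=rewrite | github.com/Joao-Lucas-Pontes-Freitas/Acumulado | Acumulativo/4° Período/Teoria dos Grafos/Revisao/main.py | KruskalFloresta
-- ===== SOURCE A (Python) =====
-- class UnionFind:
--     def __init__(self, n):
--         self.pai = [i for i in range(n + 1)]
--
--     def find(self, v):
--         if v == self.pai[v]:
--             return v
--         self.pai[v] = self.find(self.pai[v])
--         return self.pai[v]
--
--     def union(self, u, v):
--         u = self.find(self.pai[u])
--         v = self.find(self.pai[v])
--         if u == v:
--             return
--         self.pai[u] = v
--
-- def KruskalFloresta(lista, n, num):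
--     lista.sort(key=lambda x: x[2])
--     arvore = []
--     conjunto = UnionFind(n)
--     num_componentes = n
--
--     for elemento in lista:
--         x, y, p = elemento
--
--         if conjunto.find(x) != conjunto.find(y):
--             conjunto.union(x, y)
--             arvore.append(elemento)
--             num_componentes -= 1
--
--             if num_componentes == num:
--                 break
--
--     return arvore
-- ===== SOURCE B (Python) =====
-- def KruskalFloresta(lista, n, num):
--     lista.sort(key=lambda x: x[2])
--     comp = list(range(n + 1))
--     arvore = []
--     num_componentes = n
--
--     for elemento in lista:
--         x, y, p = elemento
--         cx, cy = comp[x], comp[y]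
--         if cx != cy:
--             for v in range(len(comp)):
--                 if comp[v] == cx:
--                     comp[v] = cy
--             arvore.append(elemento)
--             num_componentes -= 1
--             if num_componentes == num:
--                 break
--
--     return arvore
-- ===== Notes on version B (the rewrite author's own statement) =====
-- stated objective: simpler
-- what changed: Replaces the recursive UnionFind class (parent array, path-compressing find, union by root rewiring) with a flat list of component labels: a merge relabels every vertex of one class in a single linear scan, so there is no recursion and no tree structure.
-- outside the precondition, e.g. on KruskalFloresta([(0, 1, 0), (9, 9, 1)], 1, 0): A returns [(0, 1, 0)], B returns [(0, 1, 0)]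
import Mathlib
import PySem

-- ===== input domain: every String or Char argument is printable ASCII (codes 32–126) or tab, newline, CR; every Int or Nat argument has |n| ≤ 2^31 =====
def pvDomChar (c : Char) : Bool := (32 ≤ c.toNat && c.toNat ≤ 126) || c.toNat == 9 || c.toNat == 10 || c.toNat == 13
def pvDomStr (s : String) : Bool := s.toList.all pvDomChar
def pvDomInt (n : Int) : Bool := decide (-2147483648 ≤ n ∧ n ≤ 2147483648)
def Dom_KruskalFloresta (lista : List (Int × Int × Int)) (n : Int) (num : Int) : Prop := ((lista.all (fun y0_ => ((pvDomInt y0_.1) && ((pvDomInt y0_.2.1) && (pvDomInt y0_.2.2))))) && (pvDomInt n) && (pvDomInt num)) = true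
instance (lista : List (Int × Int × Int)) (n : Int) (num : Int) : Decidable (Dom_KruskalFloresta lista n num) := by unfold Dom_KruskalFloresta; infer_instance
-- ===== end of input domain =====

-- B replaces A's union-find (with path compression) by a flat list of component labels,
-- relabelling one class on each merge: simpler, no recursion, same return value.
-- Both A and B sort `lista` in place in Python; the equivalence proved here is about the
-- return value (the in-place sort is identical in both).

-- ===== PORT A =====

-- UnionFind.find, with path compression; returns (root, updated pai).
-- The fuel argument only makes the recursion structural; fuel = len(pai) always
-- suffices on inputs admitted by Pre_ (proved below), so this is exact there.
def pvFindA : Nat → List Int → Int → Int × List Int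
  | 0, pai, v => (v, pai)
  | fuel + 1, pai, v =>
    match PySem.List.pyGet? pai v with
    | none => (v, pai)          -- Python raises IndexError here; excluded by Pre_
    | some pv =>
      if v = pv then (v, pai)
      else
        -- self.pai[v] = self.find(self.pai[v]); return self.pai[v]
        let r := pvFindA fuel pai pv
        (r.1, PySem.List.pySetD r.2 v r.1)

-- UnionFind.union: u = find(pai[u]); v = find(pai[v]); if u == v: return; pai[u] = v
-- (pyGetD default is never used inside Pre_: the index is in range there).
def pvUnionA (pai : List Int) (u v : Int) : List Int :=
  let fu := pvFindA pai.length pai (PySem.List.pyGetD pai u 0)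
  let fv := pvFindA fu.2.length fu.2 (PySem.List.pyGetD fu.2 v 0)
  if fu.1 = fv.1 then fv.2 else PySem.List.pySetD fv.2 fu.1 fv.1

-- the for-loop over the sorted edges, with early break at num components
def pvLoopA (num : Int) : List (Int × Int × Int) → List Int → Int → List (Int × Int × Int) → List (Int × Int × Int)
  | [], _, _, arv => arv
  | e :: rest, pai, nc, arv =>
    let fx := pvFindA pai.length pai e.1
    let fy := pvFindA fx.2.length fx.2 e.2.1
    if fx.1 ≠ fy.1 then
      let pai' := pvUnionA fy.2 e.1 e.2.1
      if nc - 1 = num then arv ++ [e]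
      else pvLoopA num rest pai' (nc - 1) (arv ++ [e])
    else pvLoopA num rest fy.2 nc arv

def KruskalFloresta (lista : List (Int × Int × Int)) (n : Int) (num : Int) : List (Int × Int × Int) :=
  pvLoopA num (PySem.List.sorted lista (fun e => e.2.2) false) (PySem.List.pyRange 0 (n + 1) 1) n []

-- ===== PORT B =====

-- comp[v] is v's component label; a merge relabels the whole class of x to y's label
-- (the `for v in range(len(comp))` relabel loop is the map below).
def pvLoopB (num : Int) : List (Int × Int × Int) → List Int → Int → List (Int × Int × Int) → List (Int × Int × Int)
  | [], _, _, arv => arv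
  | e :: rest, comp, nc, arv =>
    let cx := PySem.List.pyGetD comp e.1 0
    let cy := PySem.List.pyGetD comp e.2.1 0
    if cx ≠ cy then
      let comp' := comp.map fun c => if c = cx then cy else c
      if nc - 1 = num then arv ++ [e]
      else pvLoopB num rest comp' (nc - 1) (arv ++ [e])
    else pvLoopB num rest comp nc arv

def KruskalFloresta_alt (lista : List (Int × Int × Int)) (n : Int) (num : Int) : List (Int × Int × Int) :=
  pvLoopB num (PySem.List.sorted lista (fun e => e.2.2) false) (PySem.List.pyRange 0 (n + 1) 1) n []

-- ===== PRECONDITION & SPEC =====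

-- Pre_ excludes the inputs on which the Python A raises IndexError (an edge endpoint
-- outside Python's valid index range [-(n+1), n] for the length-(n+1) parent list, or
-- n < 0 with a nonempty edge list); B raises there too.  Slightly narrower than A's
-- domain: an out-of-range edge sorted after the early break point is never read, so
-- both programs still return (the same value) on such inputs.
def Pre_KruskalFloresta (lista : List (Int × Int × Int)) (n : Int) (num : Int) : Prop :=
  lista = [] ∨ (0 ≤ n ∧ ∀ e ∈ lista, -(n + 1) ≤ e.1 ∧ e.1 ≤ n ∧ -(n + 1) ≤ e.2.1 ∧ e.2.1 ≤ n)

instance (lista : List (Int × Int × Int)) (n : Int) (num : Int) : Decidable (Pre_KruskalFloresta lista n num) := by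
  unfold Pre_KruskalFloresta; infer_instance

def pvWitness_KruskalFloresta : (List (Int × Int × Int)) × Int × Int := ([(0, 1, 5), (1, 2, 3), (0, 2, 4)], 2, 1)

def Spec_KruskalFloresta (lista : List (Int × Int × Int)) (n : Int) (num : Int) (out : List (Int × Int × Int)) : Prop := out = KruskalFloresta_alt lista n num
instance (lista : List (Int × Int × Int)) (n : Int) (num : Int) (out : List (Int × Int × Int)) : Decidable (Spec_KruskalFloresta lista n num out) := by unfold Spec_KruskalFloresta; infer_instance

-- ===== CLAIM (what is proved, stated in full; the proofs are below) =====
def Claim_equal_KruskalFloresta : Prop := ∀ (lista : List (Int × Int × Int)) (n : Int) (num : Int), Dom_KruskalFloresta lista n num → Pre_KruskalFloresta lista n num → Spec_KruskalFloresta lista n num (KruskalFloresta lista n num)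

-- ===== LEMMAS AND PROOFS =====

-- the Nat index Python's xs[v] actually reads, for -len ≤ v < len
def pvIdx (m : Nat) (v : Int) : Nat := if 0 ≤ v then v.toNat else m - (-v).toNat

lemma pvIdx_lt (m : Nat) (v : Int) (h1 : -(m : Int) ≤ v) (h2 : v < m) : pvIdx m v < m := by
  unfold pvIdx; split <;> omega

lemma pyGet?_pvIdx (xs : List Int) (v : Int) (h1 : -(xs.length : Int) ≤ v) (h2 : v < xs.length) :
    PySem.List.pyGet? xs v = some (xs.getD (pvIdx xs.length v) 0) := by
  have hk := pvIdx_lt xs.length v h1 h2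
  simp only [PySem.List.pyGet?, PySem.List.pyIdx?, pvIdx, if_pos h1, if_pos h2]
  split
  · simp [List.getElem?_eq_getElem (by omega : v.toNat < xs.length)]
  · have hlt : xs.length - (-v).toNat < xs.length := by simp only [pvIdx] at hk; omega
    simp [List.getElem?_eq_getElem hlt]

lemma pyGetD_pvIdx (xs : List Int) (v : Int) (h1 : -(xs.length : Int) ≤ v) (h2 : v < xs.length) :
    PySem.List.pyGetD xs v 0 = xs.getD (pvIdx xs.length v) 0 := by
  simp [PySem.List.pyGetD, pyGet?_pvIdx xs v h1 h2]

lemma pySetD_pvIdx (xs : List Int) (v : Int) (a : Int) (h1 : -(xs.length : Int) ≤ v) (h2 : v < xs.length) :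
    PySem.List.pySetD xs v a = xs.set (pvIdx xs.length v) a := by
  simp only [PySem.List.pySetD, PySem.List.pySet?, PySem.List.pyIdx?, pvIdx, if_pos h1, if_pos h2]
  split <;> rfl

-- the parent (resp. label) function of a list, on Nat indices
def pvF (pai : List Int) (i : Nat) : Nat := (pai.getD i 0).toNat

def pvWF (pai : List Int) : Prop := ∀ i < pai.length, 0 ≤ pai.getD i 0 ∧ pai.getD i 0 < (pai.length : Int)

lemma pvF_lt {pai : List Int} (hW : pvWF pai) {i : Nat} (hi : i < pai.length) : pvF pai i < pai.length := by
  have := hW i hi; unfold pvF; omega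

lemma getD_eq_pvF {pai : List Int} (hW : pvWF pai) {i : Nat} (hi : i < pai.length) :
    pai.getD i 0 = (pvF pai i : Int) := by
  have := hW i hi; unfold pvF; omega

-- abstract rooted-forest reasoning over f : Nat → Nat
def pvARoot (f : Nat → Nat) (i r : Nat) : Prop := f r = r ∧ ∃ k, f^[k] i = r

def RootOf (pai : List Int) (i r : Nat) : Prop := pvARoot (pvF pai) i r

def Good (pai : List Int) : Prop := pvWF pai ∧ ∀ i < pai.length, ∃ r, RootOf pai i r

lemma pvARoot_unique {f : Nat → Nat} {i r1 r2 : Nat} (h1 : pvARoot f i r1) (h2 : pvARoot f i r2) : r1 = r2 := by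
  obtain ⟨hf1, k1, hk1⟩ := h1
  obtain ⟨hf2, k2, hk2⟩ := h2
  rcases le_total k1 k2 with h | h
  · have : f^[k2] i = r1 := by
      have h3 := Function.iterate_add_apply f (k2 - k1) k1 i
      rw [Nat.sub_add_cancel h] at h3
      rw [h3, hk1, Function.iterate_fixed hf1]
    rw [← hk2, this]
  · have : f^[k1] i = r2 := by
      have h3 := Function.iterate_add_apply f (k1 - k2) k2 i
      rw [Nat.sub_add_cancel h] at h3
      rw [h3, hk2, Function.iterate_fixed hf2]
    rw [← hk1, this]

lemma pvARoot_step {f : Nat → Nat} {i r : Nat} : pvARoot f (f i) r ↔ pvARoot f i r := by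
  constructor
  · rintro ⟨hf, k, hk⟩
    exact ⟨hf, k + 1, by rwa [Function.iterate_succ_apply]⟩
  · rintro ⟨hf, k, hk⟩
    refine ⟨hf, ?_⟩
    cases k with
    | zero =>
      refine ⟨0, ?_⟩
      simp only [Function.iterate_zero, id_eq] at hk ⊢
      rw [hk, hf]
    | succ k => exact ⟨k, by rwa [Function.iterate_succ_apply] at hk⟩

lemma pvIter_lt {f : Nat → Nat} {m : Nat} (hf : ∀ j < m, f j < m) {i : Nat} (hi : i < m) (k : Nat) :
    f^[k] i < m := by
  induction k with
  | zero => simpa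
  | succ k ih => rw [Function.iterate_succ_apply']; exact hf _ ih

-- pigeonhole: the minimal distance to the root is < m
lemma pvARoot_reach_bound {f : Nat → Nat} {m : Nat} (hf : ∀ j < m, f j < m) {i r : Nat}
    (hi : i < m) (h : pvARoot f i r) : ∃ k, k < m ∧ f^[k] i = r ∧ ∀ t < k, f^[t] i ≠ r := by
  obtain ⟨hfix, hex⟩ := h
  have hd := Nat.find_spec hex
  set d := Nat.find hex with hdd
  have hmin : ∀ t < d, f^[t] i ≠ r := fun t ht => Nat.find_min hex ht
  refine ⟨d, ?_, hd, hmin⟩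
  by_contra hge
  rw [Nat.not_lt] at hge
  -- the d+1 values f^[0] i, …, f^[d] i are pairwise distinct and all < m : contradiction
  have hinj : Set.InjOn (fun t => f^[t] i) (Finset.range (d + 1)) := by
    intro a ha b hb hab
    simp only [Finset.coe_range, Set.mem_Iio] at ha hb
    by_contra hne
    rcases Nat.lt_or_ge a b with hlt | hge2
    · have : f^[a + (d - b)] i = r := by
        have h1 := Function.iterate_add_apply f (d - b) b i
        rw [Nat.sub_add_cancel (by omega), hd] at h1
        have h2 := Function.iterate_add_apply f (d - b) a i
        simp only at hab
        rw [hab] at h2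
        rw [Nat.add_comm] at h2
        rw [h2, ← h1]
      exact hmin _ (by omega) this
    · have hlt2 : b < a := by omega
      have : f^[b + (d - a)] i = r := by
        have h1 := Function.iterate_add_apply f (d - a) a i
        rw [Nat.sub_add_cancel (by omega), hd] at h1
        have h2 := Function.iterate_add_apply f (d - a) b i
        simp only at hab
        rw [← hab] at h2
        rw [Nat.add_comm] at h2
        rw [h2, ← h1]
      exact hmin _ (by omega) this
  have hmaps : ∀ t ∈ Finset.range (d + 1), f^[t] i ∈ Finset.range m := by
    intro t _
    simp only [Finset.mem_range]
    exact pvIter_lt hf hi t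
  have := Finset.card_le_card_of_injOn _ hmaps hinj
  simp only [Finset.card_range] at this
  omega

lemma pvRootOf_lt {pai : List Int} (hW : pvWF pai) {i r : Nat} (hi : i < pai.length)
    (h : RootOf pai i r) : r < pai.length := by
  obtain ⟨hfix, k, hk⟩ := h
  rw [← hk]
  exact pvIter_lt (fun j hj => pvF_lt hW hj) hi k

-- path compression: rewiring j straight to its own root changes no root
lemma pvARoot_compress {f : Nat → Nat} {j r : Nat} (hr : pvARoot f j r) (i s : Nat) :
    pvARoot (fun t => if t = j then r else f t) i s ↔ pvARoot f i s := by
  set f' := fun t => if t = j then r else f t with hf'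
  have hfix' : ∀ s, f s = s → f' s = s := by
    intro s hs
    by_cases hsj : s = j
    · subst hsj
      have : r = s := pvARoot_unique hr ⟨hs, 0, rfl⟩
      simp [hf', this]
    · simp [hf', hsj, hs]
  constructor
  · rintro ⟨hfixS, k, hk⟩
    -- translate the f'-path back to f
    have hfS : f s = s := by
      by_cases hsj : s = j
      · subst hsj
        have hrj : r = s := by simpa [hf'] using hfixS
        rw [← hrj]
        exact hr.1
      · simpa [hf', hsj] using hfixS
    refine ⟨hfS, ?_⟩
    clear hfixS
    induction k generalizing i with
    | zero => exact ⟨0, hk⟩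
    | succ k ih =>
      rw [Function.iterate_succ_apply] at hk
      by_cases hij : i = j
      · subst hij
        have hstep : f' i = r := by simp [hf']
        rw [hstep] at hk
        obtain ⟨k', hk'⟩ := ih r hk
        obtain ⟨_, kj, hkj⟩ := hr
        exact ⟨k' + kj, by rw [Function.iterate_add_apply, hkj, hk']⟩
      · have hstep : f' i = f i := by simp [hf', hij]
        rw [hstep] at hk
        obtain ⟨k', hk'⟩ := ih (f i) hk
        exact ⟨k' + 1, by rwa [Function.iterate_succ_apply]⟩
  · rintro ⟨hfixS, k, hk⟩
    refine ⟨hfix' s hfixS, ?_⟩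
    induction k generalizing i with
    | zero => exact ⟨0, hk⟩
    | succ k ih =>
      rw [Function.iterate_succ_apply] at hk
      by_cases hij : i = j
      · subst hij
        -- s is i's root, but so is r: s = r, and f' i = r directly
        have hs' : pvARoot f i s := ⟨hfixS, k + 1, by rwa [Function.iterate_succ_apply]⟩
        have hrs : r = s := pvARoot_unique hr hs'
        refine ⟨1, ?_⟩
        simp [hf', hrs]
      · obtain ⟨k', hk'⟩ := ih (f i) hk
        refine ⟨k' + 1, ?_⟩
        rw [Function.iterate_succ_apply]
        simpa [hf', hij] using hk'

-- union: rewiring the root ru onto the root rv merges exactly the two classes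
lemma pvARoot_union {f : Nat → Nat} {ru rv : Nat} (hru : f ru = ru) (hrv : f rv = rv)
    (hne : ru ≠ rv) {i : Nat} (hex : ∃ s0, pvARoot f i s0) (s : Nat) :
    pvARoot (fun t => if t = ru then rv else f t) i s ↔
      ((pvARoot f i s ∧ s ≠ ru) ∨ (pvARoot f i ru ∧ s = rv)) := by
  set f' := fun t => if t = ru then rv else f t with hf'
  have hrv' : f' rv = rv := by simp [hf', (Ne.symm hne : rv ≠ ru), hrv]
  have fwd1 : ∀ i s, pvARoot f i s → s ≠ ru → pvARoot f' i s := by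
    rintro i s ⟨hfix, k, hk⟩ hsru
    refine ⟨by simp [hf', hsru, hfix], ?_⟩
    induction k generalizing i with
    | zero => exact ⟨0, hk⟩
    | succ k ih =>
      rw [Function.iterate_succ_apply] at hk
      by_cases hiu : i = ru
      · rw [hiu, hru] at hk
        have : s = ru := by rw [← hk, Function.iterate_fixed hru]
        exact absurd this hsru
      · obtain ⟨k', hk'⟩ := ih (f i) hk
        exact ⟨k' + 1, by rw [Function.iterate_succ_apply]; simpa [hf', hiu] using hk'⟩
  have fwd2 : ∀ i, pvARoot f i ru → pvARoot f' i rv := by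
    rintro i ⟨_, k, hk⟩
    refine ⟨hrv', ?_⟩
    induction k generalizing i with
    | zero =>
      subst hk
      exact ⟨1, by simp [hf']⟩
    | succ k ih =>
      rw [Function.iterate_succ_apply] at hk
      by_cases hiu : i = ru
      · subst hiu
        exact ⟨1, by simp [hf']⟩
      · obtain ⟨k', hk'⟩ := ih (f i) hk
        exact ⟨k' + 1, by rw [Function.iterate_succ_apply]; simpa [hf', hiu] using hk'⟩
  constructor
  · intro h
    obtain ⟨s0, hs0⟩ := hex
    by_cases hs0u : s0 = ru
    · subst hs0u
      exact Or.inr ⟨hs0, pvARoot_unique h (fwd2 i hs0)⟩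
    · have := fwd1 i s0 hs0 hs0u
      have heq : s = s0 := pvARoot_unique h this
      subst heq
      exact Or.inl ⟨hs0, hs0u⟩
  · rintro (⟨h, hsru⟩ | ⟨h, rfl⟩)
    · exact fwd1 i s h hsru
    · exact fwd2 i h

lemma pvF_set {pai : List Int} {j : Nat} (hj : j < pai.length) (x : Int) :
    pvF (pai.set j x) = fun i => if i = j then x.toNat else pvF pai i := by
  funext i
  simp only [pvF, List.getD_eq_getElem?_getD, List.getElem?_set]
  by_cases hij : i = j
  · simp [hij, hj]
  · simp [hij, Ne.symm hij]

lemma pvWF_set {pai : List Int} (hW : pvWF pai) {x : Int} (h0 : 0 ≤ x) (hx : x < (pai.length : Int)) (j : Nat) :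
    pvWF (pai.set j x) := by
  intro i hi
  rw [List.length_set] at hi
  simp only [List.getD_eq_getElem?_getD, List.getElem?_set]
  by_cases hij : j = i
  · simp [hij, hi, List.length_set, h0, hx]
  · simp only [hij, if_false, List.length_set]
    have := hW i hi
    simpa [List.getD_eq_getElem?_getD, List.length_set] using this

-- specification of pvFindA on a nonnegative in-range argument
lemma pvFindA_spec_nat : ∀ (fuel : Nat) (pai : List Int) (i k : Nat), Good pai → i < pai.length →
    pvF pai ((pvF pai)^[k] i) = (pvF pai)^[k] i → k < fuel →
    ∃ r : Nat, RootOf pai i r ∧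
      (pvFindA fuel pai (i : Int)).1 = (r : Int) ∧
      (pvFindA fuel pai (i : Int)).2.length = pai.length ∧
      Good (pvFindA fuel pai (i : Int)).2 ∧
      (∀ a s, RootOf (pvFindA fuel pai (i : Int)).2 a s ↔ RootOf pai a s) := by
  intro fuel
  induction fuel with
  | zero => intro pai i k hG hi hfix hk; omega
  | succ fuel ih =>
    intro pai i k hG hi hfix hk
    have hW := hG.1
    have hget : PySem.List.pyGet? pai (i : Int) = some ((pvF pai i : Nat) : Int) := by
      rw [PySem.List.pyGet?_natCast, List.getElem?_eq_getElem hi]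
      rw [← getD_eq_pvF hW hi, List.getD_eq_getElem _ _ hi]
    have heval : pvFindA (fuel + 1) pai (i : Int) =
        if (i : Int) = ((pvF pai i : Nat) : Int) then ((i : Int), pai)
        else ((pvFindA fuel pai ((pvF pai i : Nat) : Int)).1,
          PySem.List.pySetD (pvFindA fuel pai ((pvF pai i : Nat) : Int)).2 (i : Int)
            (pvFindA fuel pai ((pvF pai i : Nat) : Int)).1) := by
      rw [pvFindA, hget]
    by_cases hroot : pvF pai i = i
    · rw [heval, if_pos (by exact_mod_cast hroot.symm)]
      exact ⟨i, ⟨hroot, 0, rfl⟩, rfl, rfl, hG, fun a s => Iff.rfl⟩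
    · rw [heval, if_neg (by intro h; exact hroot (by exact_mod_cast h.symm))]
      have hk1 : 1 ≤ k := by
        rcases Nat.eq_zero_or_pos k with h0 | h1
        · exfalso; rw [h0] at hfix; simp only [Function.iterate_zero, id_eq] at hfix
          exact hroot hfix
        · exact h1
      have hfix' : pvF pai ((pvF pai)^[k - 1] (pvF pai i)) = (pvF pai)^[k - 1] (pvF pai i) := by
        rw [← Function.iterate_succ_apply]
        have hkk : (k - 1).succ = k := by omega
        rw [hkk]
        exact hfix
      obtain ⟨r, hrRoot, hres1, hlen, hGood1, hiff⟩ :=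
        ih pai (pvF pai i) (k - 1) hG (pvF_lt hW hi) hfix' (by omega)
      set pai1 := (pvFindA fuel pai ((pvF pai i : Nat) : Int)).2 with hpai1
      have hRi : RootOf pai i r := pvARoot_step.mp hrRoot
      have hrlt : r < pai.length := pvRootOf_lt hW hi hRi
      have hR1i : RootOf pai1 i r := (hiff i r).mpr hRi
      have hset : PySem.List.pySetD pai1 (i : Int) ((r : Nat) : Int) = pai1.set i ((r : Nat) : Int) := by
        rw [PySem.List.pySetD_of_nonneg _ _ (by positivity)]
        simp
      have hilen1 : i < pai1.length := by omega
      have hFset : pvF (pai1.set i ((r : Nat) : Int)) = fun t => if t = i then r else pvF pai1 t := by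
        rw [pvF_set hilen1]
        simp
      refine ⟨r, hRi, by rw [hres1], ?_, ?_, ?_⟩
      · simp only [hres1, hset, List.length_set]; omega
      · constructor
        · simp only [hres1, hset]
          exact pvWF_set hGood1.1 (by positivity) (by omega) i
        · intro a ha
          simp only [hres1, hset, List.length_set] at ha ⊢
          obtain ⟨s, hs⟩ := hGood1.2 a ha
          refine ⟨s, ?_⟩
          unfold RootOf
          rw [hFset]
          exact (pvARoot_compress hR1i a s).mpr hs
      · intro a s
        simp only [hres1, hset]
        have h1 : RootOf (pai1.set i ((r : Nat) : Int)) a s ↔ RootOf pai1 a s := by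
          unfold RootOf
          rw [hFset]
          exact pvARoot_compress hR1i a s
        rw [h1, hiff]

-- pvFindA with fuel = len(pai) computes the root, for any in-range (possibly negative) index
lemma pvFindA_spec (pai : List Int) (v : Int) (hG : Good pai)
    (h1 : -(pai.length : Int) ≤ v) (h2 : v < pai.length) :
    ∃ r : Nat, RootOf pai (pvIdx pai.length v) r ∧
      (pvFindA pai.length pai v).1 = (r : Int) ∧
      (pvFindA pai.length pai v).2.length = pai.length ∧
      Good (pvFindA pai.length pai v).2 ∧
      (∀ a s, RootOf (pvFindA pai.length pai v).2 a s ↔ RootOf pai a s) := by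
  have hW := hG.1
  rcases le_or_gt 0 v with hv0 | hv0
  · -- nonnegative index: the generic lemma applies directly
    have hvnat : ((v.toNat : Nat) : Int) = v := by omega
    have hidx : pvIdx pai.length v = v.toNat := by unfold pvIdx; rw [if_pos hv0]
    have hi : v.toNat < pai.length := by omega
    obtain ⟨r0, hr0⟩ := hG.2 v.toNat hi
    obtain ⟨k, hkm, hkr, -⟩ :=
      pvARoot_reach_bound (fun j hj => pvF_lt hW hj) hi hr0
    have hfix : pvF pai ((pvF pai)^[k] v.toNat) = (pvF pai)^[k] v.toNat := by
      rw [hkr]; exact hr0.1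
    obtain ⟨r, h1, h2, h3, h4, h5⟩ := pvFindA_spec_nat pai.length pai v.toNat k hG hi hfix hkm
    rw [hvnat] at h2 h3 h4 h5
    exact ⟨r, hidx ▸ h1, h2, h3, h4, h5⟩
  · -- negative index: unroll one step by hand (the first parent read is nonnegative)
    set i := pvIdx pai.length v with hidef
    have him : i < pai.length := pvIdx_lt _ _ h1 h2
    have hm1 : 1 ≤ pai.length := by omega
    obtain ⟨fuel, hfuel⟩ : ∃ f, pai.length = f + 1 := ⟨pai.length - 1, by omega⟩
    have hget : PySem.List.pyGet? pai v = some ((pvF pai i : Nat) : Int) := by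
      rw [pyGet?_pvIdx pai v h1 h2, ← hidef, getD_eq_pvF hW him]
    have heval0 : pvFindA pai.length pai v =
        if v = ((pvF pai i : Nat) : Int) then (v, pai)
        else ((pvFindA fuel pai ((pvF pai i : Nat) : Int)).1,
          PySem.List.pySetD (pvFindA fuel pai ((pvF pai i : Nat) : Int)).2 v
            (pvFindA fuel pai ((pvF pai i : Nat) : Int)).1) := by
      rw [hfuel, pvFindA, hget]
    have heval : pvFindA pai.length pai v =
        ((pvFindA fuel pai ((pvF pai i : Nat) : Int)).1,
          PySem.List.pySetD (pvFindA fuel pai ((pvF pai i : Nat) : Int)).2 v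
            (pvFindA fuel pai ((pvF pai i : Nat) : Int)).1) := by
      rw [heval0, if_neg (by intro h; omega)]
    obtain ⟨r0, hr0⟩ := hG.2 i him
    obtain ⟨d, hdm, hdr, -⟩ :=
      pvARoot_reach_bound (fun j hj => pvF_lt hW hj) him hr0
    -- interface of the inner call
    have hI : ∃ r : Nat, RootOf pai i r ∧
        (pvFindA fuel pai ((pvF pai i : Nat) : Int)).1 = (r : Int) ∧
        (pvFindA fuel pai ((pvF pai i : Nat) : Int)).2.length = pai.length ∧
        Good (pvFindA fuel pai ((pvF pai i : Nat) : Int)).2 ∧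
        (∀ a s, RootOf (pvFindA fuel pai ((pvF pai i : Nat) : Int)).2 a s ↔ RootOf pai a s) := by
      rcases Nat.eq_zero_or_pos fuel with hf0 | hf1
      · -- len = 1 : i is already its own root and the inner call is out of fuel
        have hd0 : d = 0 := by omega
        rw [hd0] at hdr
        simp only [Function.iterate_zero, id_eq] at hdr
        have hri : pvF pai i = r0 := by rw [hdr]; exact hr0.1
        subst hf0
        exact ⟨r0, hr0, by simp [pvFindA, hri], rfl, hG, fun a s => Iff.rfl⟩
      · have hstep : (pvF pai)^[d - 1] (pvF pai i) = r0 := by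
          rcases Nat.eq_zero_or_pos d with hd0 | hd1
          · rw [hd0] at hdr
            simp only [Function.iterate_zero, id_eq] at hdr
            simp only [hd0, Nat.zero_sub, Function.iterate_zero, id_eq]
            rw [hdr]; exact hr0.1
          · rw [← Function.iterate_succ_apply]
            have : (d - 1).succ = d := by omega
            rw [this]; exact hdr
        have hfix : pvF pai ((pvF pai)^[d - 1] (pvF pai i)) = (pvF pai)^[d - 1] (pvF pai i) := by
          rw [hstep]; exact hr0.1
        obtain ⟨r, h1', h2', h3', h4', h5'⟩ :=
          pvFindA_spec_nat fuel pai (pvF pai i) (d - 1) hG (pvF_lt hW him) hfix (by omega)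
        exact ⟨r, pvARoot_step.mp h1', h2', h3', h4', h5'⟩
    obtain ⟨r, hRi, hres1, hlen, hGood1, hiff⟩ := hI
    set pai1 := (pvFindA fuel pai ((pvF pai i : Nat) : Int)).2 with hpai1
    have hrlt : r < pai.length := pvRootOf_lt hW him hRi
    have hR1i : RootOf pai1 i r := (hiff i r).mpr hRi
    have hset : PySem.List.pySetD pai1 v ((r : Nat) : Int) = pai1.set i ((r : Nat) : Int) := by
      rw [pySetD_pvIdx pai1 v _ (by omega) (by omega), hlen, ← hidef]
    have hilen1 : i < pai1.length := by omega
    have hFset : pvF (pai1.set i ((r : Nat) : Int)) = fun t => if t = i then r else pvF pai1 t := by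
      rw [pvF_set hilen1]
      simp
    refine ⟨r, hRi, by rw [heval, hres1], ?_, ?_, ?_⟩
    · simp only [heval, hres1, hset, List.length_set]; omega
    · constructor
      · simp only [heval, hres1, hset]
        exact pvWF_set hGood1.1 (by positivity) (by omega) i
      · intro a ha
        simp only [heval, hres1, hset, List.length_set] at ha ⊢
        obtain ⟨s, hs⟩ := hGood1.2 a ha
        refine ⟨s, ?_⟩
        unfold RootOf
        rw [hFset]
        exact (pvARoot_compress hR1i a s).mpr hs
    · intro a s
      simp only [heval, hres1, hset]
      have hcomp : RootOf (pai1.set i ((r : Nat) : Int)) a s ↔ RootOf pai1 a s := by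
        unfold RootOf
        rw [hFset]
        exact pvARoot_compress hR1i a s
      rw [hcomp, hiff]

lemma pvUnionA_spec (pai : List Int) (x y : Int) (rx ry : Nat) (hG : Good pai)
    (hx1 : -(pai.length : Int) ≤ x) (hx2 : x < pai.length)
    (hy1 : -(pai.length : Int) ≤ y) (hy2 : y < pai.length)
    (hrx : RootOf pai (pvIdx pai.length x) rx) (hry : RootOf pai (pvIdx pai.length y) ry)
    (hne : rx ≠ ry) :
    (pvUnionA pai x y).length = pai.length ∧ Good (pvUnionA pai x y) ∧
      (∀ a, a < pai.length → ∀ s, RootOf (pvUnionA pai x y) a s ↔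
        ((RootOf pai a s ∧ s ≠ rx) ∨ (RootOf pai a rx ∧ s = ry))) := by
  have hW := hG.1
  set ix := pvIdx pai.length x with hix
  set iy := pvIdx pai.length y with hiy
  have hixm : ix < pai.length := pvIdx_lt _ _ hx1 hx2
  have hiym : iy < pai.length := pvIdx_lt _ _ hy1 hy2
  have hpu : PySem.List.pyGetD pai x 0 = ((pvF pai ix : Nat) : Int) := by
    rw [pyGetD_pvIdx pai x hx1 hx2, ← hix, getD_eq_pvF hW hixm]
  have hpu0 : (0 : Int) ≤ ((pvF pai ix : Nat) : Int) := by positivity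
  have hpum : ((pvF pai ix : Nat) : Int) < pai.length := by
    have := pvF_lt hW hixm; omega
  obtain ⟨r1, hr1Root, hr1val, hr1len, hr1Good, hr1iff⟩ :=
    pvFindA_spec pai ((pvF pai ix : Nat) : Int) hG (by omega) hpum
  have hidx1 : pvIdx pai.length ((pvF pai ix : Nat) : Int) = pvF pai ix := by
    unfold pvIdx; rw [if_pos hpu0]; simp
  rw [hidx1] at hr1Root
  have hr1rx : r1 = rx :=
    pvARoot_unique (pvARoot_step.mp hr1Root) hrx
  rw [hr1rx] at hr1val hr1Root
  set paiA := (pvFindA pai.length pai ((pvF pai ix : Nat) : Int)).2 with hpaiA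
  -- second find, on the compressed list paiA
  have hWA := hr1Good.1
  have hiymA : iy < paiA.length := by omega
  have hiyA : pvIdx paiA.length y = iy := by rw [hr1len, ← hiy]
  have hpv : PySem.List.pyGetD paiA y 0 = ((pvF paiA iy : Nat) : Int) := by
    rw [pyGetD_pvIdx paiA y (by omega) (by omega), hiyA, getD_eq_pvF hWA hiymA]
  have hpv0 : (0 : Int) ≤ ((pvF paiA iy : Nat) : Int) := by positivity
  have hpvm : ((pvF paiA iy : Nat) : Int) < paiA.length := by
    have := pvF_lt hWA hiymA; omega
  obtain ⟨r2, hr2Root, hr2val, hr2len, hr2Good, hr2iff⟩ :=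
    pvFindA_spec paiA ((pvF paiA iy : Nat) : Int) hr1Good (by omega) hpvm
  have hidx2 : pvIdx paiA.length ((pvF paiA iy : Nat) : Int) = pvF paiA iy := by
    unfold pvIdx; rw [if_pos hpv0]; simp
  rw [hidx2] at hr2Root
  have hr2ry : r2 = ry := by
    have h1 : RootOf paiA iy r2 := pvARoot_step.mp hr2Root
    have h2 : RootOf pai iy r2 := (hr1iff iy r2).mp h1
    exact pvARoot_unique h2 hry
  rw [hr2ry] at hr2val hr2Root
  set paiB := (pvFindA paiA.length paiA ((pvF paiA iy : Nat) : Int)).2 with hpaiB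
  have hlenB : paiB.length = pai.length := by omega
  have hiffB : ∀ a s, RootOf paiB a s ↔ RootOf pai a s := by
    intro a s; rw [hr2iff, hr1iff]
  -- evaluate pvUnionA
  have heval : pvUnionA pai x y = PySem.List.pySetD paiB ((rx : Nat) : Int) ((ry : Nat) : Int) := by
    unfold pvUnionA
    simp only [hpu, ← hpaiA, hr1val, hpv, ← hpaiB, hr2val]
    rw [if_neg (by intro h; exact hne (by exact_mod_cast h))]
  have hrxm : rx < pai.length := pvRootOf_lt hW hixm hrx
  have hrym : ry < pai.length := pvRootOf_lt hW hiym hry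
  have hset : PySem.List.pySetD paiB ((rx : Nat) : Int) ((ry : Nat) : Int) = paiB.set rx ((ry : Nat) : Int) := by
    rw [PySem.List.pySetD_of_nonneg _ _ (by positivity)]; simp
  have hRrxB : RootOf paiB rx rx := (hiffB rx rx).mpr ⟨hrx.1, 0, rfl⟩
  have hRryB : RootOf paiB ry ry := (hiffB ry ry).mpr ⟨hry.1, 0, rfl⟩
  have hFB : pvF paiB rx = rx := hRrxB.1
  have hFBy : pvF paiB ry = ry := hRryB.1
  have hFset : pvF (paiB.set rx ((ry : Nat) : Int)) = fun t => if t = rx then ry else pvF paiB t := by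
    rw [pvF_set (by omega)]
    simp
  have hchar : ∀ a, a < pai.length → ∀ s,
      RootOf (paiB.set rx ((ry : Nat) : Int)) a s ↔
        ((RootOf pai a s ∧ s ≠ rx) ∨ (RootOf pai a rx ∧ s = ry)) := by
    intro a ha s
    unfold RootOf
    rw [hFset]
    rw [pvARoot_union hFB hFBy hne (hr2Good.2 a (by omega)) s]
    constructor
    · rintro (⟨h, h2⟩ | ⟨h, h2⟩)
      · exact Or.inl ⟨(hiffB a s).mp h, h2⟩
      · exact Or.inr ⟨(hiffB a rx).mp h, h2⟩
    · rintro (⟨h, h2⟩ | ⟨h, h2⟩)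
      · exact Or.inl ⟨(hiffB a s).mpr h, h2⟩
      · exact Or.inr ⟨(hiffB a rx).mpr h, h2⟩
  refine ⟨?_, ⟨?_, ?_⟩, ?_⟩
  · rw [heval, hset, List.length_set]; omega
  · rw [heval, hset]
    exact pvWF_set hr2Good.1 (by positivity) (by omega) rx
  · intro a ha
    rw [heval, hset, List.length_set] at ha
    obtain ⟨s0, hs0⟩ := hG.2 a (by omega)
    rw [heval, hset]
    by_cases hs0rx : s0 = rx
    · exact ⟨ry, (hchar a (by omega) ry).mpr (Or.inr ⟨hs0rx ▸ hs0, rfl⟩)⟩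
    · exact ⟨s0, (hchar a (by omega) s0).mpr (Or.inl ⟨hs0, hs0rx⟩)⟩
  · intro a ha s
    rw [heval, hset]
    exact hchar a ha s

def Sim (pai comp : List Int) : Prop :=
  pai.length = comp.length ∧ Good pai ∧
    ∀ i j, i < pai.length → j < pai.length →
      ((∃ r, RootOf pai i r ∧ RootOf pai j r) ↔ comp.getD i 0 = comp.getD j 0)

lemma pvLoop_sim : ∀ (edges : List (Int × Int × Int)) (num : Int) (pai comp : List Int) (nc : Int)
    (arv : List (Int × Int × Int)), Sim pai comp →
    (∀ e ∈ edges, -(pai.length : Int) ≤ e.1 ∧ e.1 < pai.length ∧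
      -(pai.length : Int) ≤ e.2.1 ∧ e.2.1 < pai.length) →
    pvLoopA num edges pai nc arv = pvLoopB num edges comp nc arv := by
  intro edges
  induction edges with
  | nil => intro num pai comp nc arv _ _; rfl
  | cons e rest ih =>
    intro num pai comp nc arv hSim hrange
    obtain ⟨hlen, hG, hcnx⟩ := hSim
    have hW := hG.1
    have he := hrange e (List.mem_cons_self)
    have hrest := fun e' he' => hrange e' (List.mem_cons_of_mem e he')
    set ix := pvIdx pai.length e.1 with hix
    set iy := pvIdx pai.length e.2.1 with hiy
    have hixm : ix < pai.length := pvIdx_lt _ _ he.1 he.2.1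
    have hiym : iy < pai.length := pvIdx_lt _ _ he.2.2.1 he.2.2.2
    -- A side: the two find calls
    obtain ⟨rx, hrxRoot, hfx1, hfxlen, hfxGood, hfxiff⟩ :=
      pvFindA_spec pai e.1 hG he.1 he.2.1
    set paiA := (pvFindA pai.length pai e.1).2 with hpaiA
    obtain ⟨ry, hryRootA, hfy1, hfylen, hfyGood, hfyiff⟩ :=
      pvFindA_spec paiA e.2.1 hfxGood (by rw [hfxlen]; exact he.2.2.1) (by rw [hfxlen]; exact he.2.2.2)
    set paiB := (pvFindA paiA.length paiA e.2.1).2 with hpaiB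
    have hidxA : pvIdx paiA.length e.2.1 = iy := by rw [hfxlen, ← hiy]
    rw [hidxA] at hryRootA
    have hryRoot : RootOf pai iy ry := (hfxiff iy ry).mp hryRootA
    have hlenB : paiB.length = pai.length := by omega
    have hiffB : ∀ a s, RootOf paiB a s ↔ RootOf pai a s := by
      intro a s; rw [hfyiff, hfxiff]
    -- B side: the two label reads
    have hcx : PySem.List.pyGetD comp e.1 0 = comp.getD ix 0 := by
      rw [pyGetD_pvIdx comp e.1 (by rw [← hlen]; exact he.1) (by rw [← hlen]; exact he.2.1), hix, hlen]
    have hcy : PySem.List.pyGetD comp e.2.1 0 = comp.getD iy 0 := by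
      rw [pyGetD_pvIdx comp e.2.1 (by rw [← hlen]; exact he.2.2.1) (by rw [← hlen]; exact he.2.2.2), hiy, hlen]
    -- roots agree iff labels agree
    have hkey : rx = ry ↔ comp.getD ix 0 = comp.getD iy 0 := by
      rw [← hcnx ix iy hixm hiym]
      constructor
      · intro h; exact ⟨rx, hrxRoot, h ▸ hryRoot⟩
      · rintro ⟨r, h1, h2⟩
        rw [pvARoot_unique hrxRoot h1, pvARoot_unique hryRoot h2]
    -- one step of each loop
    have hevalA : pvLoopA num (e :: rest) pai nc arv =
        if (rx : Int) ≠ (ry : Int) then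
          (if nc - 1 = num then arv ++ [e]
           else pvLoopA num rest (pvUnionA paiB e.1 e.2.1) (nc - 1) (arv ++ [e]))
        else pvLoopA num rest paiB nc arv := by
      simp only [pvLoopA, ← hpaiA, ← hpaiB, hfx1, hfy1]
    have hevalB : pvLoopB num (e :: rest) comp nc arv =
        if comp.getD ix 0 ≠ comp.getD iy 0 then
          (if nc - 1 = num then arv ++ [e]
           else pvLoopB num rest (comp.map fun c => if c = comp.getD ix 0 then comp.getD iy 0 else c) (nc - 1) (arv ++ [e]))
        else pvLoopB num rest comp nc arv := by
      simp only [pvLoopB, hcx, hcy]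
    rw [hevalA, hevalB]
    by_cases hsame : rx = ry
    · rw [if_neg (by simp [hsame]), if_neg (not_not_intro (hkey.mp hsame))]
      apply ih
      · exact ⟨by omega, hfyGood, fun i j hi hj => by
          constructor
          · rintro ⟨r, h1, h2⟩
            exact (hcnx i j (by omega) (by omega)).mp ⟨r, (hiffB i r).mp h1, (hiffB j r).mp h2⟩
          · intro h
            obtain ⟨r, h1, h2⟩ := (hcnx i j (by omega) (by omega)).mpr h
            exact ⟨r, (hiffB i r).mpr h1, (hiffB j r).mpr h2⟩⟩
      · intro e' he'
        have h := hrest e' he'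
        exact ⟨by omega, by omega, by omega, by omega⟩
    · have hcne : ¬ comp.getD ix 0 = comp.getD iy 0 := fun h => hsame (hkey.mpr h)
      rw [if_pos (by simpa using fun h => hsame (by exact_mod_cast h)), if_pos hcne]
      by_cases hbrk : nc - 1 = num
      · rw [if_pos hbrk, if_pos hbrk]
      · rw [if_neg hbrk, if_neg hbrk]
        -- the merge: union on the A side, relabel on the B side
        have hRxB : RootOf paiB ix rx := (hiffB ix rx).mpr hrxRoot
        have hRyB : RootOf paiB iy ry := (hiffB iy ry).mpr hryRoot
        have hidxBx : pvIdx paiB.length e.1 = ix := by rw [hlenB, ← hix]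
        have hidxBy : pvIdx paiB.length e.2.1 = iy := by rw [hlenB, ← hiy]
        obtain ⟨hUlen, hUGood, hUchar⟩ :=
          pvUnionA_spec paiB e.1 e.2.1 rx ry hfyGood
            (by omega) (by omega) (by omega) (by omega)
            (hidxBx ▸ hRxB) (hidxBy ▸ hRyB) hsame
        -- characterisation of new roots, relative to the ORIGINAL pai
        have hchar : ∀ a, a < pai.length → ∀ ra, RootOf pai a ra → ∀ s,
            (RootOf (pvUnionA paiB e.1 e.2.1) a s ↔ s = if ra = rx then ry else ra) := by
          intro a ha ra hra s
          rw [hUchar a (by omega) s]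
          by_cases hrarx : ra = rx
          · rw [if_pos hrarx]
            constructor
            · rintro (⟨h, h2⟩ | ⟨h, h2⟩)
              · exact absurd (pvARoot_unique ((hiffB a s).mp h) (hrarx ▸ hra)) h2
              · exact h2
            · intro h
              exact Or.inr ⟨(hiffB a rx).mpr (hrarx ▸ hra), h⟩
          · rw [if_neg hrarx]
            constructor
            · rintro (⟨h, h2⟩ | ⟨h, h2⟩)
              · exact pvARoot_unique ((hiffB a s).mp h) hra
              · exact absurd (pvARoot_unique hra ((hiffB a rx).mp h)) hrarx
            · intro h
              rw [h]
              exact Or.inl ⟨(hiffB a ra).mpr hra, hrarx⟩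
        apply ih
        · refine ⟨by simp only [List.length_map]; omega, hUGood, ?_⟩
          intro i j hi hj
          rw [hUlen] at hi hj
          obtain ⟨ri, hri⟩ := hG.2 i (by omega)
          obtain ⟨rj, hrj⟩ := hG.2 j (by omega)
          have hchi := hchar i (by omega) ri hri
          have hchj := hchar j (by omega) rj hrj
          have hLHS : (∃ r, RootOf (pvUnionA paiB e.1 e.2.1) i r ∧ RootOf (pvUnionA paiB e.1 e.2.1) j r) ↔
              (if ri = rx then ry else ri) = (if rj = rx then ry else rj) := by
            constructor
            · rintro ⟨r, h1, h2⟩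
              rw [← (hchi r).mp h1, ← (hchj r).mp h2]
            · intro h
              exact ⟨if ri = rx then ry else ri, (hchi _).mpr rfl, (hchj _).mpr h⟩
          have hgm : ∀ a, a < pai.length →
              (comp.map fun c => if c = comp.getD ix 0 then comp.getD iy 0 else c).getD a 0 =
                if comp.getD a 0 = comp.getD ix 0 then comp.getD iy 0 else comp.getD a 0 := by
            intro a ha
            have ha' : a < comp.length := by omega
            simp [List.getD_eq_getElem?_getD, List.getElem?_map, List.getElem?_eq_getElem ha']
          rw [hLHS, hgm i (by omega), hgm j (by omega)]
          -- bridge individual root/label equalities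
          have bridge : ∀ a, a < pai.length → ∀ ra, RootOf pai a ra →
              ((ra = rx ↔ comp.getD a 0 = comp.getD ix 0) ∧ (ra = ry ↔ comp.getD a 0 = comp.getD iy 0)) := by
            intro a ha ra hra
            constructor
            · rw [← hcnx a ix (by omega) hixm]
              constructor
              · intro h; exact ⟨rx, h ▸ hra, hrxRoot⟩
              · rintro ⟨r, h1, h2⟩; rw [pvARoot_unique hra h1, pvARoot_unique hrxRoot h2]
            · rw [← hcnx a iy (by omega) hiym]
              constructor
              · intro h; exact ⟨ry, h ▸ hra, hryRoot⟩
              · rintro ⟨r, h1, h2⟩; rw [pvARoot_unique hra h1, pvARoot_unique hryRoot h2]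
          have hcc : ri = rj ↔ comp.getD i 0 = comp.getD j 0 := by
            rw [← hcnx i j (by omega) (by omega)]
            constructor
            · intro h; exact ⟨ri, hri, h ▸ hrj⟩
            · rintro ⟨r, h1, h2⟩; rw [pvARoot_unique hri h1, pvARoot_unique hrj h2]
          obtain ⟨hbix, hbiy⟩ := bridge i (by omega) ri hri
          obtain ⟨hbjx, hbjy⟩ := bridge j (by omega) rj hrj
          by_cases h1 : ri = rx <;> by_cases h2 : rj = rx
          · rw [if_pos h1, if_pos h2, if_pos (hbix.mp h1), if_pos (hbjx.mp h2)]
            simp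
          · rw [if_pos h1, if_neg h2, if_pos (hbix.mp h1), if_neg (fun h => h2 (hbjx.mpr h))]
            rw [show ((ry = rj) ↔ (rj = ry)) from eq_comm, hbjy, eq_comm]
          · rw [if_neg h1, if_pos h2, if_neg (fun h => h1 (hbix.mpr h)), if_pos (hbjx.mp h2)]
            rw [hbiy]
          · rw [if_neg h1, if_neg h2, if_neg (fun h => h1 (hbix.mpr h)), if_neg (fun h => h2 (hbjx.mpr h))]
            rw [hcc]
        · intro e' he'
          have h := hrest e' he'
          rw [hUlen]
          exact ⟨by omega, by omega, by omega, by omega⟩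

-- ===== VERDICT (by name: the statement is the Claim_ definition above) =====
lemma pvInit_getD (b : Int) (i : Nat) (hi : i < (PySem.List.pyRange 0 b 1).length) :
    (PySem.List.pyRange 0 b 1).getD i 0 = (i : Int) := by
  rw [List.getD_eq_getElem _ _ hi, PySem.List.getElem_pyRange_one]
  simp

theorem KruskalFloresta_spec : Claim_equal_KruskalFloresta := by
  intro lista n num _hDom hPre
  unfold Spec_KruskalFloresta KruskalFloresta KruskalFloresta_alt
  rcases hPre with rfl | ⟨hn, hall⟩
  · rfl
  · set pai0 := PySem.List.pyRange 0 (n + 1) 1 with hpai0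
    have hlen0 : pai0.length = (n + 1).toNat := by
      rw [hpai0, PySem.List.length_pyRange_one]
      omega
    have hlenI : (pai0.length : Int) = n + 1 := by omega
    have hF0 : ∀ i, i < pai0.length → pvF pai0 i = i := by
      intro i hi
      unfold pvF
      rw [pvInit_getD (n + 1) i hi]
      simp
    have hRoot0 : ∀ i r, i < pai0.length → RootOf pai0 i r → r = i := by
      intro i r hi h
      exact pvARoot_unique h ⟨hF0 i hi, 0, rfl⟩
    have hSim : Sim pai0 pai0 := by
      refine ⟨rfl, ⟨?_, ?_⟩, ?_⟩
      · intro i hi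
        rw [pvInit_getD (n + 1) i hi]
        omega
      · intro i hi
        exact ⟨i, ⟨hF0 i hi, 0, rfl⟩⟩
      · intro i j hi hj
        rw [pvInit_getD (n + 1) i hi, pvInit_getD (n + 1) j hj]
        constructor
        · rintro ⟨r, h1, h2⟩
          rw [← hRoot0 i r hi h1, ← hRoot0 j r hj h2]
        · intro h
          have hij : i = j := by omega
          exact ⟨i, ⟨hF0 i hi, 0, rfl⟩, hij ▸ ⟨hF0 i hi, 0, rfl⟩⟩
    apply pvLoop_sim _ num pai0 pai0 n [] hSim
    intro e hmem
    have he := hall e ((PySem.List.mem_sorted _ _ _ _).mp hmem)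
    exact ⟨by omega, by omega, by omega, by omega⟩
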